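-- pv_equiv track=rewrite | github.com/Python-BI-2023/Peer_review | RAG2.py | peptide_cutter
-- ===== SOURCE A (Python) =====
-- def peptide_cutter(sequence: str, enzyme: str = "trypsin") -> str:
--     """
--     This function identifies cleavage sites in a given peptide sequence using a specified enzyme.
--
--     Args: sequence (str): The input peptide sequence. enzyme (str): The enzyme to be used for cleavage. Choose
--     between "trypsin" and "chymotrypsin". Default is "trypsin".
--
--     Returns: str: A message indicating the number and positions of cleavage sites, or an error message if an invalid
--     enzyme is provided.
--     """
--     cleavage_sites = []
--     if enzyme not in ("trypsin", "chymotrypsin"):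
--         return "You have chosen an enzyme that is not provided. Please choose between trypsin and chymotrypsin."
--
--     if enzyme == "trypsin":  # Trypsin cuts peptide chains mainly at the carboxyl side of the amino acids lysine or
--         # arginine.
--         for aa in range(len(sequence) - 1):
--             if sequence[aa] in ['K', 'R', 'k', 'r'] and sequence[aa + 1] not in ['P', 'p']:
--                 cleavage_sites.append(aa + 1)
--
--     if enzyme == "chymotrypsin":  # Chymotrypsin preferentially cleaves at Trp, Tyr and Phe in position P1(high
--         # specificity)
--         for aa in range(len(sequence) - 1):
--             if sequence[aa] in ['W', 'Y', 'F', 'w', 'y', 'f'] and sequence[aa + 1] not in ['P', 'p']: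
--                 cleavage_sites.append(aa + 1)
--
--     if cleavage_sites:
--         return f"Found {len(cleavage_sites)} {enzyme} cleavage sites at positions {', '.join(map(str, cleavage_sites))}"
--     else:
--         return f"No {enzyme} cleavage sites were found."
-- ===== SOURCE B (Python) =====
-- def peptide_cutter(sequence: str, enzyme: str = "trypsin") -> str:
--     if enzyme not in ("trypsin", "chymotrypsin"):
--         return "You have chosen an enzyme that is not provided. Please choose between trypsin and chymotrypsin."
--     residues = "KRkr" if enzyme == "trypsin" else "WYFwyf"
--     # Stage 1: per-residue occurrence lists, merged by sorting into ascending position order.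
--     hits = sorted(i for r in residues
--                     for i, c in enumerate(sequence) if c == r)
--     # Stage 2: keep the occurrences actually followed by a non-proline residue.
--     cleavage_sites = [i + 1 for i in hits
--                       if i + 1 < len(sequence) and sequence[i + 1] not in "Pp"]
--     if cleavage_sites:
--         return f"Found {len(cleavage_sites)} {enzyme} cleavage sites at positions {', '.join(map(str, cleavage_sites))}"
--     else:
--         return f"No {enzyme} cleavage sites were found."
-- ===== Notes on version B (the rewrite author's own statement) =====
-- stated objective: alternative
-- what changed: A makes one indexed left-to-right scan testing both residue and next-char conditions per position; B instead collects a separate occurrence list per residue character, merges them into ascending order with sorted(), and only then filters out occurrences followed by P/p or at the end (staged occurrence-list-and-merge instead of a single conditional scan).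
import Mathlib
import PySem

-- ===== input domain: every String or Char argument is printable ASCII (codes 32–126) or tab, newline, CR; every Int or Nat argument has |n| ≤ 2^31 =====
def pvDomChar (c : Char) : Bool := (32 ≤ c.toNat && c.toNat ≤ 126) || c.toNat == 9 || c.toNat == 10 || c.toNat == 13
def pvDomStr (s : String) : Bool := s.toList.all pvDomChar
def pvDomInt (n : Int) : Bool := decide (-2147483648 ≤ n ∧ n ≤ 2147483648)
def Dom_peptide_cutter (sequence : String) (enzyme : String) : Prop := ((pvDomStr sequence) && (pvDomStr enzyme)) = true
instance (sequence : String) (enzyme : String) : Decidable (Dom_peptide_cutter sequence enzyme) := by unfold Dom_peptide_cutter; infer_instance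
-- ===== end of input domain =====

-- B replaces A's single conditional scan by per-residue occurrence lists merged with sorted() and a separate position filter (objective: alternative; same order of cost).

-- ===== PORT A =====
-- A's per-enzyme `for aa in range(len(sequence) - 1): if sequence[aa] in residues and sequence[aa+1] not in ['P','p']: cleavage_sites.append(aa + 1)`
def pvLoopA (cs : List Char) (residues : List Char) (cleavage_sites : List Int) : List Int :=
  (PySem.List.pyRange 0 ((cs.length : Int) - 1) 1).foldl (fun acc aa =>
    if (residues.contains (PySem.List.pyGetD cs aa ' ')
        && !(['P','p'].contains (PySem.List.pyGetD cs (aa + 1) ' ')))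
    then acc ++ [aa + 1] else acc) cleavage_sites

def peptide_cutter (sequence : String) (enzyme : String) : String :=
  let cleavage_sites : List Int := []
  if ¬ (enzyme = "trypsin" ∨ enzyme = "chymotrypsin") then
    "You have chosen an enzyme that is not provided. Please choose between trypsin and chymotrypsin."
  else
    let cleavage_sites : List Int :=
      if enzyme = "trypsin" then pvLoopA sequence.toList ['K','R','k','r'] cleavage_sites
      else cleavage_sites
    let cleavage_sites : List Int :=
      if enzyme = "chymotrypsin" then pvLoopA sequence.toList ['W','Y','F','w','y','f'] cleavage_sites
      else cleavage_sites
    if cleavage_sites ≠ [] then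
      "Found " ++ PySem.Int.toStr (cleavage_sites.length : Int) ++ " " ++ enzyme ++
        " cleavage sites at positions " ++
        PySem.Str.join ", " (cleavage_sites.map PySem.Int.toStr)
    else
      "No " ++ enzyme ++ " cleavage sites were found."

-- ===== PORT B =====
-- B's `sorted(i for r in residues for i, c in enumerate(sequence) if c == r)`
def pvHitsB (cs : List Char) (residues : List Char) : List Int :=
  PySem.List.sorted
    (residues.flatMap (fun r =>
      (PySem.List.enumerate cs 0).filterMap (fun p => if p.2 == r then some p.1 else none)))
    (fun x => x) false

-- B's `[i + 1 for i in hits if i + 1 < len(sequence) and sequence[i + 1] not in "Pp"]`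
def pvSitesB (cs : List Char) (residues : List Char) : List Int :=
  (pvHitsB cs residues).filterMap (fun i =>
    if (i + 1 < (cs.length : Int)) ∧ ¬ (PySem.List.pyGetD cs (i + 1) ' ' ∈ ['P','p'])
    then some (i + 1) else none)

def peptide_cutter_alt (sequence : String) (enzyme : String) : String :=
  if ¬ (enzyme = "trypsin" ∨ enzyme = "chymotrypsin") then
    "You have chosen an enzyme that is not provided. Please choose between trypsin and chymotrypsin."
  else
    let residues : List Char :=
      if enzyme = "trypsin" then ['K','R','k','r'] else ['W','Y','F','w','y','f']
    let cleavage_sites : List Int := pvSitesB sequence.toList residues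
    if cleavage_sites ≠ [] then
      "Found " ++ PySem.Int.toStr (cleavage_sites.length : Int) ++ " " ++ enzyme ++
        " cleavage sites at positions " ++
        PySem.Str.join ", " (cleavage_sites.map PySem.Int.toStr)
    else
      "No " ++ enzyme ++ " cleavage sites were found."

-- ===== PRECONDITION & SPEC =====
def Spec_peptide_cutter (sequence : String) (enzyme : String) (out : String) : Prop := out = peptide_cutter_alt sequence enzyme
instance (sequence : String) (enzyme : String) (out : String) : Decidable (Spec_peptide_cutter sequence enzyme out) := by unfold Spec_peptide_cutter; infer_instance

-- ===== CLAIM (what is proved, stated in full; the proofs are below) =====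
def Claim_equal_peptide_cutter : Prop := ∀ (sequence : String) (enzyme : String), Dom_peptide_cutter sequence enzyme → Spec_peptide_cutter sequence enzyme (peptide_cutter sequence enzyme)

-- ===== LEMMAS AND PROOFS =====

theorem filter_or_perm {α : Type} (p q : α → Bool) (h : ∀ x, p x = true → q x = false) (l : List α) :
    (l.filter (fun x => p x || q x)).Perm (l.filter p ++ l.filter q) := by
  induction l with
  | nil => simp
  | cons a t ih =>
    by_cases hp : p a
    · have hq := h a hp
      simpa [hp, hq] using ih
    · by_cases hq : q a
      · simp only [List.filter_cons, hp, hq, Bool.false_or, if_pos]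
        exact (ih.cons a).trans List.perm_middle.symm
      · simpa [hp, hq] using ih

theorem flatMap_filter_perm (L : List (Int × Char)) (rs : List Char) (hnd : rs.Nodup) :
    (rs.flatMap (fun r => L.filter (fun p => p.2 == r))).Perm (L.filter (fun p => rs.contains p.2)) := by
  induction rs with
  | nil => simp
  | cons r rest ih =>
    rcases List.nodup_cons.mp hnd with ⟨hr, hrest⟩
    have step := filter_or_perm (fun p : Int × Char => p.2 == r) (fun p => rest.contains p.2)
      (by intro x hx; simp at hx; simp [hx]; simpa using hr) L
    have h1 : (r :: rest).flatMap (fun r => L.filter (fun p => p.2 == r))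
        = L.filter (fun p => p.2 == r) ++ rest.flatMap (fun r => L.filter (fun p => p.2 == r)) := by simp
    have h2 : L.filter (fun p => (r :: rest).contains p.2)
        = L.filter (fun p => p.2 == r || rest.contains p.2) := by
      apply List.filter_congr; intro x _; simp only [List.contains_cons]
    rw [h1, h2]
    exact (((ih hrest).append_left _).trans step.symm)


theorem hits_eq (cs residues : List Char) (hnd : residues.Nodup) :
    pvHitsB cs residues
      = ((PySem.List.enumerate cs 0).filter (fun p => residues.contains p.2)).map (·.1) := by
  unfold pvHitsB
  apply PySem.List.sorted_eq_of_perm_of_pairwise_lt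
  · have h1 : ∀ r : Char, (PySem.List.enumerate cs 0).filterMap (fun p => if p.2 == r then some p.1 else none)
        = ((PySem.List.enumerate cs 0).filter (fun p => p.2 == r)).map (·.1) := by
      intro r
      rw [← List.filterMap_eq_map, List.filterMap_filter]
      simp
    simp only [h1]
    rw [← List.map_flatMap]
    exact (List.Perm.map _ (flatMap_filter_perm _ _ hnd)).symm
  · rw [List.pairwise_map]
    exact (PySem.List.pairwise_lt_enumerate cs 0).filter _


theorem sites_bridge (cs residues : List Char) (hnd : residues.Nodup) :
    pvLoopA cs residues [] = pvSitesB cs residues := by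
  unfold pvLoopA pvSitesB
  rw [PySem.List.foldl_append_if
        (p := fun aa => residues.contains (PySem.List.pyGetD cs aa ' ')
            && !(['P','p'].contains (PySem.List.pyGetD cs (aa + 1) ' ')))
        (f := fun aa => aa + 1)]
  rw [hits_eq cs residues hnd]
  rw [PySem.List.enumerate_eq_map_pyRange (d := ' ')]
  rw [List.filter_map, List.map_map]
  have hid : ((fun (x : Int × Char) => x.1) ∘ fun j => (j, PySem.List.pyGetD cs j ' ')) = id := rfl
  rw [hid, List.map_id, List.filterMap_filter]
  simp only [List.nil_append, Function.comp]
  rcases cs with _ | ⟨c, cs'⟩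
  · rfl
  · set cs := c :: cs' with hcs
    have hlen : (PySem.List.len cs : Int) = ((cs.length : Int) - 1) + 1 := by
      simp [PySem.List.len, hcs]
    rw [hlen, PySem.List.pyRange_one_succ_right (by simp [hcs])]
    rw [List.filterMap_append]
    have hnl : ¬ (((cs.length : Int) - 1) + 1 < (cs.length : Int)) := by omega
    simp only [List.filterMap_cons, List.filterMap_nil, hnl, false_and, if_false, ite_self,
      List.append_nil]
    rw [← List.filterMap_eq_map, List.filterMap_filter]
    apply List.filterMap_congr
    intro x hx
    rw [PySem.List.mem_pyRange_one] at hx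
    have hx1 : x + 1 < (cs.length : Int) := by omega
    by_cases hc : PySem.List.pyGetD cs x ' ' ∈ residues
    · by_cases hm : PySem.List.pyGetD cs (x + 1) ' ' ∈ ['P','p'] <;>
        simp [hc, hm, hx1]
    · simp [hc]

theorem peptide_cutter_eq (sequence enzyme : String) :
    peptide_cutter sequence enzyme = peptide_cutter_alt sequence enzyme := by
  unfold peptide_cutter peptide_cutter_alt
  by_cases ht : enzyme = "trypsin"
  · simp [ht, sites_bridge sequence.toList ['K','R','k','r'] (by decide)]
  · by_cases hc : enzyme = "chymotrypsin"
    · simp [hc, sites_bridge sequence.toList ['W','Y','F','w','y','f'] (by decide)]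
    · simp [ht, hc]

-- ===== VERDICT (by name: the statement is the Claim_ definition above) =====
theorem peptide_cutter_spec : Claim_equal_peptide_cutter := by
  intro s e _
  exact peptide_cutter_eq s e
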